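-- pv_equiv track=rewrite | github.com/Tatsh/tatsh-overlay | scripts/ebuild_parser.py | _parse_src_uri
-- ===== SOURCE A (Python) =====
-- def _parse_src_uri(value: str) -> dict[str, str]:
--     """Parse SRC_URI into dict of URI to filename mappings."""
--     result = {}
--     tokens = value.replace('\n', ' ').split()
--     i = 0
--     while i < len(tokens):
--         if i + 2 < len(tokens) and tokens[i + 1] == '->':
--             result[tokens[i]] = tokens[i + 2]
--             i += 3
--         else:
--             uri = tokens[i]
--             result[uri] = uri.split('/')[-1]
--             i += 1
--     return result
-- ===== SOURCE B (Python) =====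
-- def _parse_src_uri(value: str) -> dict[str, str]:
--     """Parse SRC_URI into dict of URI to filename mappings.
--
--     One streaming pass over the tokens with a small pending buffer
--     (no index arithmetic / lookahead): `pend` is [] (nothing), [uri]
--     (a token that may yet turn out to be the source of an arrow), or
--     [uri, '->'] (awaiting the arrow target).
--     """
--     result = {}
--     pend = []
--     for tok in value.split():
--         if len(pend) == 2:
--             result[pend[0]] = tok
--             pend = []
--         elif len(pend) == 1 and tok == '->':
--             pend.append(tok)
--         else:
--             for t in pend:
--                 result[t] = t.rpartition('/')[2]
--             pend = [tok]
--     for t in pend: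
--         result[t] = t.rpartition('/')[2]
--     return result
-- ===== Notes on version B (the rewrite author's own statement) =====
-- stated objective: alternative
-- what changed: Replaces A's index-arithmetic while-loop with two-token lookahead (tokens[i+1], tokens[i+2]) by a single streaming for-loop over the tokens driven by a small pending buffer ([], [uri] or [uri,'->']), flushing an incomplete tail as plain tokens; basename via rpartition instead of split.
import Mathlib
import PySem

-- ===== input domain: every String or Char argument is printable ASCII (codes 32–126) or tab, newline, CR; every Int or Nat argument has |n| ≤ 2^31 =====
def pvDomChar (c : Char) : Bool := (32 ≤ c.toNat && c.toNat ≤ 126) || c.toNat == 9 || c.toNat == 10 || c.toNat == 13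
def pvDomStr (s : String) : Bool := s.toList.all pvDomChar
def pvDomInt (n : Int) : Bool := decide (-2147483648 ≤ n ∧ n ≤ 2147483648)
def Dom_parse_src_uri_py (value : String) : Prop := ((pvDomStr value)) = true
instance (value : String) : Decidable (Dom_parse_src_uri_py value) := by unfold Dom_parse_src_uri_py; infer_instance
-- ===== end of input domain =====

-- B replaces A's index-arithmetic while-loop with two-token lookahead by one streaming
-- pass over the tokens driven by a small pending buffer (objective: alternative).

-- ===== PORT A =====
-- uri.split('/')[-1] : PySem.Chars.splitOn is s.split(sep); [-1] via pyGetD (the list is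
-- never empty, so the default is never used)
def pvBasenameA (uri : String) : String :=
  PySem.List.pyGetD ((PySem.Chars.splitOn uri.toList ['/']).map String.ofList) (-1) ""

-- the while-loop of A: index i over tokens, result dict threaded through
def pvALoop (tokens : List String) (i : Nat) (result : PySem.Dict String String) :
    PySem.Dict String String :=
  if i < tokens.length then
    if i + 2 < tokens.length ∧ tokens.getD (i + 1) "" = "->" then
      pvALoop tokens (i + 3) (result.insert (tokens.getD i "") (tokens.getD (i + 2) ""))
    else
      pvALoop tokens (i + 1)
        (result.insert (tokens.getD i "") (pvBasenameA (tokens.getD i "")))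
  else result
termination_by tokens.length - i

def parse_src_uri_py (value : String) : List (String × String) :=
  (pvALoop (PySem.Str.split₀ (PySem.Str.replace value "\n" " ")) 0 PySem.Dict.empty).items

-- ===== PORT B =====
-- t.rpartition('/')[2]: the suffix of t after its last '/' (t itself if no '/'); exact
def pvBasenameB (t : String) : String :=
  String.ofList ((t.toList.reverse.takeWhile (· ≠ '/')).reverse)

-- flush the pending buffer: each buffered token becomes a plain uri ↦ basename entry
def pvFlush (pend : List String) (result : PySem.Dict String String) :
    PySem.Dict String String :=
  pend.foldl (fun r t => r.insert t (pvBasenameB t)) result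

-- the streaming for-loop of B: pend is [], [uri] or [uri, "->"]
def pvBLoop (toks pend : List String) (result : PySem.Dict String String) :
    PySem.Dict String String :=
  match toks with
  | [] => pvFlush pend result
  | tok :: rest =>
    if pend.length = 2 then
      pvBLoop rest [] (result.insert (pend.getD 0 "") tok)
    else if pend.length = 1 ∧ tok = "->" then
      pvBLoop rest (pend ++ [tok]) result
    else
      pvBLoop rest [tok] (pvFlush pend result)

def parse_src_uri_py_alt (value : String) : List (String × String) :=
  (pvBLoop (PySem.Str.split₀ value) [] PySem.Dict.empty).items

-- ===== PRECONDITION & SPEC =====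
def Spec_parse_src_uri_py (value : String) (out : List (String × String)) : Prop := out = parse_src_uri_py_alt value
instance (value : String) (out : List (String × String)) : Decidable (Spec_parse_src_uri_py value out) := by unfold Spec_parse_src_uri_py; infer_instance

-- ===== CLAIM (what is proved, stated in full; the proofs are below) =====
def Claim_equal_parse_src_uri_py : Prop := ∀ (value : String), Dom_parse_src_uri_py value → Spec_parse_src_uri_py value (parse_src_uri_py value)

-- ===== LEMMAS AND PROOFS =====

-- common reference loop: A's token consumption written as recursion on the token list
def pvALs (ts : List String) (r : PySem.Dict String String) : PySem.Dict String String :=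
  match ts with
  | [] => r
  | [u] => r.insert u (pvBasenameB u)
  | [u, a] => pvALs [a] (r.insert u (pvBasenameB u))
  | u :: a :: t :: rest =>
    if a = "->" then pvALs rest (r.insert u t)
    else pvALs (a :: t :: rest) (r.insert u (pvBasenameB u))
termination_by ts.length

-- ---- basenames agree ----
def pvAls (cs : List Char) : List Char := (cs.reverse.takeWhile (· ≠ '/')).reverse

theorem pv_tw_app_of_mem {p : Char → Bool} (xs ys : List Char) (a : Char) (ha : a ∈ xs)
    (hpa : p a = false) : List.takeWhile p (xs ++ ys) = List.takeWhile p xs := by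
  induction xs with
  | nil => cases ha
  | cons x xs ih =>
    by_cases hx : p x
    · rcases List.mem_cons.mp ha with rfl | hmem
      · rw [hx] at hpa; cases hpa
      · simp only [List.cons_append, List.takeWhile_cons, hx]
        rw [ih hmem]
    · simp [hx]

theorem pv_tw_app_all {p : Char → Bool} (xs ys : List Char) (h : ∀ a ∈ xs, p a = true) :
    List.takeWhile p (xs ++ ys) = xs ++ List.takeWhile p ys := by
  induction xs with
  | nil => simp
  | cons x xs ih =>
    have hx : p x = true := h x (List.mem_cons_self)
    simp only [List.cons_append, List.takeWhile_cons, hx]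
    rw [ih (fun a ha => h a (List.mem_cons_of_mem _ ha))]
    simp

theorem pvAls_cons_of_mem (c : Char) (rest : List Char) (h : '/' ∈ rest) :
    pvAls (c :: rest) = pvAls rest := by
  unfold pvAls
  rw [List.reverse_cons,
    pv_tw_app_of_mem rest.reverse [c] '/' (List.mem_reverse.mpr h) (by simp)]

theorem pvAls_of_not_mem (cs : List Char) (h : '/' ∉ cs) : pvAls cs = cs := by
  unfold pvAls
  rw [List.takeWhile_eq_self_iff.mpr, List.reverse_reverse]
  intro a ha
  simp only [decide_eq_true_eq]
  intro rfl'
  exact h (List.mem_reverse.mp (rfl' ▸ ha))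

theorem pvAls_slash_of_not_mem (rest : List Char) (h : '/' ∉ rest) :
    pvAls ('/' :: rest) = rest := by
  unfold pvAls
  rw [List.reverse_cons, pv_tw_app_all rest.reverse ['/']
    (by intro a ha; simp only [decide_eq_true_eq]; intro rfl'
        exact h (List.mem_reverse.mp (rfl' ▸ ha)))]
  simp

theorem pv_splitOn_go_getLast? (l : List Char) : ∀ (f : Nat) (cur : List Char)
    (accs : List (List Char)), l.length ≤ f →
    (PySem.Chars.splitOn.go ['/'] f l cur accs).getLast?
      = some (if '/' ∈ l then pvAls l else cur.reverse ++ l) := by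
  induction l with
  | nil =>
    intro f cur accs _
    cases f with
    | zero => simp [PySem.Chars.splitOn.go]
    | succ f => simp [PySem.Chars.splitOn.go]
  | cons c rest ih =>
    intro f cur accs hf
    cases f with
    | zero => simp at hf
    | succ f =>
      by_cases hc : c = '/'
      · subst hc
        rw [show PySem.Chars.splitOn.go ['/'] (f+1) ('/' :: rest) cur accs
            = PySem.Chars.splitOn.go ['/'] f rest [] (cur.reverse :: accs) by
          simp [PySem.Chars.splitOn.go, List.isPrefixOf]]
        rw [ih f [] (cur.reverse :: accs) (by simp at hf ⊢; omega)]
        by_cases hm : '/' ∈ rest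
        · simp [hm, pvAls_cons_of_mem _ _ hm]
        · simp [hm, pvAls_slash_of_not_mem rest hm]
      · rw [show PySem.Chars.splitOn.go ['/'] (f+1) (c :: rest) cur accs
            = PySem.Chars.splitOn.go ['/'] f rest (c :: cur) accs by
          simp [PySem.Chars.splitOn.go, List.isPrefixOf, Ne.symm hc]]
        rw [ih f (c :: cur) accs (by simp at hf ⊢; omega)]
        by_cases hm : '/' ∈ rest
        · have : '/' ∈ c :: rest := List.mem_cons_of_mem _ hm
          simp [hm, this, pvAls_cons_of_mem _ _ hm]
        · have : '/' ∉ c :: rest := by simp [hm]; exact Ne.symm hc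
          simp [hm, this]

theorem pv_basename_eq (u : String) : pvBasenameA u = pvBasenameB u := by
  unfold pvBasenameA pvBasenameB
  have hgo : (PySem.Chars.splitOn u.toList ['/']).getLast? = some (pvAls u.toList) := by
    rw [PySem.Chars.splitOn, pv_splitOn_go_getLast? u.toList (u.toList.length + 1) [] []
      (by omega)]
    by_cases hm : '/' ∈ u.toList
    · simp [hm]
    · simp [hm, pvAls_of_not_mem _ hm]
  have hmap : ((PySem.Chars.splitOn u.toList ['/']).map String.ofList).getLast?
      = some (String.ofList (pvAls u.toList)) := by
    rw [List.getLast?_map, hgo]; rfl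
  have hne : ((PySem.Chars.splitOn u.toList ['/']).map String.ofList) ≠ [] := by
    intro h0; rw [h0] at hmap; simp at hmap
  rw [PySem.List.pyGetD_neg_one _ _ hne]
  rw [List.getLast?_eq_some_getLast hne] at hmap
  exact Option.some.inj hmap

-- ---- replace('\n', ' ') does not change split() ----
def pvNl (c : Char) : Char := if c = '\n' then ' ' else c

theorem pv_replace_go (l : List Char) : ∀ (f : Nat) (acc : List Char), l.length ≤ f →
    PySem.Chars.replace.go ['\n'] [' '] f l acc = acc.reverse ++ l.map pvNl := by
  induction l with
  | nil =>
    intro f acc _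
    cases f with
    | zero => simp [PySem.Chars.replace.go]
    | succ f => simp [PySem.Chars.replace.go]
  | cons c rest ih =>
    intro f acc hf
    cases f with
    | zero => simp at hf
    | succ f =>
      by_cases hc : c = '\n'
      · subst hc
        rw [show PySem.Chars.replace.go ['\n'] [' '] (f+1) ('\n' :: rest) acc
            = PySem.Chars.replace.go ['\n'] [' '] f rest (' ' :: acc) by
          simp [PySem.Chars.replace.go, List.isPrefixOf]]
        rw [ih f (' ' :: acc) (by simp at hf ⊢; omega)]
        simp [pvNl]
      · rw [show PySem.Chars.replace.go ['\n'] [' '] (f+1) (c :: rest) acc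
            = PySem.Chars.replace.go ['\n'] [' '] f rest (c :: acc) by
          simp [PySem.Chars.replace.go, List.isPrefixOf, Ne.symm hc]]
        rw [ih f (c :: acc) (by simp at hf ⊢; omega)]
        simp [pvNl, hc]

theorem pv_replace_nl (cs : List Char) :
    PySem.Chars.replace cs ['\n'] [' '] = cs.map pvNl := by
  rw [PySem.Chars.replace, if_neg (by decide)]
  exact pv_replace_go cs cs.length [] (le_refl _)

theorem pv_isspace_pvNl (c : Char) : PySem.Chars.isspace (pvNl c) = PySem.Chars.isspace c := by
  by_cases hc : c = '\n'
  · subst hc; decide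
  · simp [pvNl, hc]

theorem pv_split0_go_map (l : List Char) : ∀ (cur : List Char) (acc : List (List Char)),
    PySem.Chars.split₀.go (l.map pvNl) cur acc = PySem.Chars.split₀.go l cur acc := by
  induction l with
  | nil => intro cur acc; simp only [List.map_nil]
  | cons c rest ih =>
    intro cur acc
    by_cases hs : PySem.Chars.isspace c = true
    · have hs' : PySem.Chars.isspace (pvNl c) = true := by rw [pv_isspace_pvNl]; exact hs
      simp only [List.map_cons]
      rw [show ∀ x xs, PySem.Chars.split₀.go (x :: xs) cur acc
          = if PySem.Chars.isspace x = true then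
              (if cur.isEmpty then PySem.Chars.split₀.go xs [] acc
               else PySem.Chars.split₀.go xs [] (cur.reverse :: acc))
            else PySem.Chars.split₀.go xs (x :: cur) acc from
        fun x xs => by simp [PySem.Chars.split₀.go]]
      rw [show PySem.Chars.split₀.go (c :: rest) cur acc
          = if PySem.Chars.isspace c = true then
              (if cur.isEmpty then PySem.Chars.split₀.go rest [] acc
               else PySem.Chars.split₀.go rest [] (cur.reverse :: acc))
            else PySem.Chars.split₀.go rest (c :: cur) acc from by
        simp [PySem.Chars.split₀.go]]
      rw [hs, hs']
      by_cases hcur : cur.isEmpty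
      · simp [hcur, ih]
      · simp [hcur, ih]
    · have hs' : PySem.Chars.isspace (pvNl c) = false := by
        rw [pv_isspace_pvNl]; exact Bool.eq_false_iff.mpr hs
      have hcc : pvNl c = c := by
        unfold pvNl
        by_cases hc : c = '\n'
        · exact absurd (hc ▸ (by decide : PySem.Chars.isspace '\n' = true)) hs
        · simp [hc]
      simp only [List.map_cons, hcc]
      rw [show PySem.Chars.split₀.go (c :: rest.map pvNl) cur acc
          = PySem.Chars.split₀.go (rest.map pvNl) (c :: cur) acc by
        simp [PySem.Chars.split₀.go, Bool.eq_false_iff.mpr hs]]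
      rw [show PySem.Chars.split₀.go (c :: rest) cur acc
          = PySem.Chars.split₀.go rest (c :: cur) acc by
        simp [PySem.Chars.split₀.go, Bool.eq_false_iff.mpr hs]]
      exact ih (c :: cur) acc

theorem pv_tokens_eq (value : String) :
    PySem.Str.split₀ (PySem.Str.replace value "\n" " ") = PySem.Str.split₀ value := by
  unfold PySem.Str.split₀ PySem.Str.replace
  congr 1
  have h1 : ("\n" : String).toList = ['\n'] := by decide
  have h2 : (" " : String).toList = [' '] := by decide
  rw [show (String.ofList (PySem.Chars.replace value.toList "\n".toList " ".toList)).toList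
      = PySem.Chars.replace value.toList ['\n'] [' '] by rw [h1, h2]; simp]
  rw [pv_replace_nl]
  unfold PySem.Chars.split₀
  exact pv_split0_go_map value.toList [] []

-- ---- A's index loop is pvALs on the dropped suffix ----
theorem pv_aloop_eq (tokens : List String) : ∀ (i : Nat) (r : PySem.Dict String String),
    pvALoop tokens i r = pvALs (tokens.drop i) r := by
  intro i
  induction hn : tokens.length - i using Nat.strong_induction_on generalizing i with
  | _ n ihn =>
  intro r
  rw [pvALoop]
  by_cases hi : i < tokens.length
  · have hdrop : tokens.drop i = tokens[i] :: tokens.drop (i + 1) :=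
      List.drop_eq_getElem_cons hi
    by_cases harr : i + 2 < tokens.length ∧ tokens.getD (i + 1) "" = "->"
    · obtain ⟨h2, ha⟩ := harr
      have h1 : i + 1 < tokens.length := by omega
      have hd1 : tokens.drop (i + 1) = tokens[i+1] :: tokens.drop (i + 2) :=
        List.drop_eq_getElem_cons h1
      have hd2 : tokens.drop (i + 2) = tokens[i+2] :: tokens.drop (i + 3) :=
        List.drop_eq_getElem_cons h2
      rw [if_pos hi, if_pos ⟨h2, ha⟩]
      rw [ihn (tokens.length - (i + 3)) (by omega) (i + 3) rfl]
      rw [List.getD_eq_getElem tokens "" h1] at ha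
      rw [hdrop, hd1, hd2, pvALs, if_pos ha,
        List.getD_eq_getElem tokens "" hi, List.getD_eq_getElem tokens "" h2]
    · rw [if_pos hi, if_neg harr]
      rw [ihn (tokens.length - (i + 1)) (by omega) (i + 1) rfl]
      rw [hdrop, List.getD_eq_getElem tokens "" hi, pv_basename_eq]
      cases hshape : tokens.drop (i + 1) with
      | nil => simp only [pvALs]
      | cons a tl =>
        cases tl with
        | nil => simp only [pvALs]
        | cons t rest =>
          have h2 : i + 2 < tokens.length := by
            have := congrArg List.length hshape
            simp [List.length_drop] at this
            omega
          have h1 : i + 1 < tokens.length := by omega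
          have ha : a = tokens[i+1] := by
            have hd1 := List.drop_eq_getElem_cons (l := tokens) h1
            rw [hshape] at hd1
            exact (List.cons.injEq _ _ _ _ ▸ hd1).1
          have hane : a ≠ "->" := by
            intro hEq
            exact harr ⟨h2, by rw [List.getD_eq_getElem tokens "" h1, ← ha, hEq]⟩
          rw [pvALs, if_neg hane]
  · rw [if_neg hi, List.drop_eq_nil_of_le (by omega), pvALs]

-- ---- B's streaming loop is pvALs on pend ++ toks ----
theorem pv_bloop_eq (toks : List String) : ∀ (pend : List String)
    (r : PySem.Dict String String),
    (pend = [] ∨ (∃ u, pend = [u]) ∨ ∃ u, pend = [u, "->"]) →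
    pvBLoop toks pend r = pvALs (pend ++ toks) r := by
  induction toks with
  | nil =>
    intro pend r hp
    rcases hp with rfl | ⟨u, rfl⟩ | ⟨u, rfl⟩
    · rw [pvBLoop]
      simp only [pvFlush, List.foldl_nil, List.append_nil, pvALs]
    · rw [pvBLoop]
      simp only [pvFlush, List.foldl_cons, List.foldl_nil, List.append_nil, pvALs]
    · rw [pvBLoop]
      simp only [pvFlush, List.foldl_cons, List.foldl_nil, List.append_nil, pvALs]
  | cons tok rest ih =>
    intro pend r hp
    rcases hp with rfl | ⟨u, rfl⟩ | ⟨u, rfl⟩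
    · rw [pvBLoop, if_neg (by simp), if_neg (fun h => by simp at h)]
      rw [ih [tok] _ (Or.inr (Or.inl ⟨tok, rfl⟩))]
      simp only [pvFlush, List.foldl_nil, List.nil_append, List.cons_append]
    · rw [pvBLoop, if_neg (by simp)]
      by_cases harr : tok = "->"
      · rw [if_pos ⟨rfl, harr⟩, harr,
          ih ([u] ++ ["->"]) r (Or.inr (Or.inr ⟨u, by simp⟩))]
        simp only [List.cons_append, List.nil_append]
      · rw [if_neg (fun h => harr h.2)]
        rw [ih [tok] _ (Or.inr (Or.inl ⟨tok, rfl⟩))]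
        simp only [pvFlush, List.foldl_cons, List.foldl_nil, List.cons_append,
          List.nil_append]
        cases rest with
        | nil => simp only [pvALs]
        | cons t rest' => rw [pvALs, if_neg harr]
    · rw [pvBLoop, if_pos (by simp)]
      rw [ih [] _ (Or.inl rfl)]
      simp only [List.nil_append, List.cons_append, List.getD_cons_zero]
      rw [pvALs, if_pos rfl]

-- ===== VERDICT (by name: the statement is the Claim_ definition above) =====
theorem parse_src_uri_py_spec : Claim_equal_parse_src_uri_py := by
  intro value _
  unfold Spec_parse_src_uri_py parse_src_uri_py parse_src_uri_py_alt
  rw [pv_tokens_eq]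
  rw [pv_aloop_eq _ 0 _, List.drop_zero]
  rw [pv_bloop_eq _ [] _ (Or.inl rfl)]
  simp only [List.nil_append]
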